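-- pv_equiv track=rewrite | github.com/strong1133/Algorithm_study | daily/2021/12/1226_P82612.py | solution
-- ===== SOURCE A (Python) =====
-- def solution(p, m, c):
--     res = 0;
--     for i in range(1, c+1):
--         res += p*i
--     if res > m :
--         return res - m
--     else:
--         return 0
-- ===== SOURCE B (Python) =====
-- def solution(p, m, c):
--     total = p * (c * (c + 1) // 2) if c > 0 else 0
--     return total - m if total > m else 0
-- ===== Notes on version B (the rewrite author's own statement) =====
-- stated objective: faster
-- what changed: Replaced the O(c) accumulation loop over range(1, c+1) by the arithmetic-series closed form p * (c*(c+1)//2).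
import Mathlib
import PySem

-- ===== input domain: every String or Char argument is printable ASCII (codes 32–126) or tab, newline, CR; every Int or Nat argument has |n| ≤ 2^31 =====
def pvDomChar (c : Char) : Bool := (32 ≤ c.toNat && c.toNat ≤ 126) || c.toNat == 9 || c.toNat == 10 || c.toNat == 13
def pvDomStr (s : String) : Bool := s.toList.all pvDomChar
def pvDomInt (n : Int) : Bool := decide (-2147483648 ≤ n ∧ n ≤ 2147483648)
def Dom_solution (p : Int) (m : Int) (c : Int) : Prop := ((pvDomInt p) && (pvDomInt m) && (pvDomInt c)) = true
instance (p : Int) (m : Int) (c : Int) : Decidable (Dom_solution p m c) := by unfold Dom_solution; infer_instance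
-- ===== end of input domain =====

-- B replaces A's O(c) accumulation loop by the arithmetic-series closed form p*(c*(c+1)//2); return value only, no side effects.

-- ===== PORT A =====
def solution (p : Int) (m : Int) (c : Int) : Int :=
  let res := (PySem.List.pyRange 1 (c + 1) 1).foldl (fun res i => res + p * i) 0
  if res > m then res - m else 0

-- ===== PORT B =====
def solution_alt (p : Int) (m : Int) (c : Int) : Int :=
  let total := if c > 0 then p * PySem.Int.floordiv (c * (c + 1)) 2 else 0
  if total > m then total - m else 0

-- ===== PRECONDITION & SPEC =====
def Spec_solution (p : Int) (m : Int) (c : Int) (out : Int) : Prop := out = solution_alt p m c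
instance (p : Int) (m : Int) (c : Int) (out : Int) : Decidable (Spec_solution p m c out) := by unfold Spec_solution; infer_instance

-- ===== CLAIM (what is proved, stated in full; the proofs are below) =====
def Claim_equal_solution : Prop := ∀ (p : Int) (m : Int) (c : Int), Dom_solution p m c → Spec_solution p m c (solution p m c)

-- ===== LEMMAS AND PROOFS =====

-- doubled Gauss sum of the loop, by induction on the number of iterations
theorem pv_twice_foldl (p : Int) (n : Nat) :
    2 * ((List.range n).foldl (fun (res : Int) (k : Nat) => res + p * (1 + (k : Int))) 0) = p * (n * (n + 1)) := by
  induction n with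
  | zero => simp
  | succ n ih =>
    rw [List.range_succ, List.foldl_append]
    simp only [List.foldl_cons, List.foldl_nil]
    push_cast
    push_cast at ih
    ring_nf
    ring_nf at ih
    linarith

theorem pv_floordiv_double (k : Int) : PySem.Int.floordiv (2 * k) 2 = k := by
  rw [PySem.Int.floordiv_eq_iff_of_pos (by norm_num)]
  constructor <;> omega

-- the loop equals the closed form
theorem pv_loop_closed (p c : Int) (hc : 0 < c) :
    (PySem.List.pyRange 1 (c + 1) 1).foldl (fun res i => res + p * i) 0
      = p * PySem.Int.floordiv (c * (c + 1)) 2 := by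
  obtain ⟨n, rfl⟩ : ∃ n : Nat, c = (n : Int) := ⟨c.toNat, by omega⟩
  rw [PySem.List.pyRange_one]
  have h1 : ((n : Int) + 1 - 1).toNat = n := by omega
  rw [h1, List.foldl_map]
  have h2 := pv_twice_foldl p n
  obtain ⟨k, hk⟩ : ∃ k : Int, (n : Int) * ((n : Int) + 1) = 2 * k := by
    rcases Int.even_mul_succ_self (n : Int) with ⟨k, hkk⟩
    exact ⟨k, by omega⟩
  rw [hk, pv_floordiv_double]
  rw [hk] at h2
  have h3 : p * (2 * k) = 2 * (p * k) := by ring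
  linarith

theorem pv_loop_empty (p c : Int) (hc : ¬ 0 < c) :
    (PySem.List.pyRange 1 (c + 1) 1).foldl (fun res i => res + p * i) 0 = 0 := by
  rw [PySem.List.pyRange_one]
  have : (c + 1 - 1).toNat = 0 := by omega
  rw [this]
  simp

-- ===== VERDICT (by name: the statement is the Claim_ definition above) =====
theorem solution_spec : Claim_equal_solution := by
  intro p m c _
  unfold Spec_solution solution solution_alt
  by_cases hc : 0 < c
  · rw [pv_loop_closed p c hc]
    simp [hc]
  · rw [pv_loop_empty p c hc]
    simp [hc]
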